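-- pv_equiv track=rewrite | github.com/MrHamdulay/csc3-capstone | examples/data/Assignment_4/grcdea001/piglatin.py | plte
-- ===== SOURCE A (Python) =====
-- def plte(word):
--     way = "way"
--     fstring = ""
--
--     if way in word:
--         for i in word:
--             if i != "w":
--                 fstring = fstring+i
--
--             else:
--                 break
--
--     else:
--         word = word[0:-2]
--         word = word[::-1]
--         firstr = ""
--         secondr = ""
--         found = False
--         for i in (word):
--             if(i != "a") and found == False:
--                 firstr = firstr + i
--             if(i == "a") and found == False:
--                 found = True
--                 continue
--
--             if (found == True):
--                 secondr = secondr +i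
--
--         fstring = firstr[::-1] + secondr[::-1]
--     return fstring
-- ===== SOURCE B (Python) =====
-- def plte(word):
--     if "way" in word:
--         return word[:word.find("w")]
--     s = word[:-2]
--     i = s.rfind("a")
--     return s if i < 0 else s[i+1:] + s[:i]
-- ===== Notes on version B (the rewrite author's own statement) =====
-- stated objective: faster
-- what changed: Replaced A's character-by-character accumulator loops (break-loop for the first branch; reverse the string and run a three-state machine for the other) with direct find/rfind plus slicing: everything before the first occurrence, resp. s[i+1:]+s[:i] around the last occurrence in s=word[:-2].
import Mathlib
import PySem

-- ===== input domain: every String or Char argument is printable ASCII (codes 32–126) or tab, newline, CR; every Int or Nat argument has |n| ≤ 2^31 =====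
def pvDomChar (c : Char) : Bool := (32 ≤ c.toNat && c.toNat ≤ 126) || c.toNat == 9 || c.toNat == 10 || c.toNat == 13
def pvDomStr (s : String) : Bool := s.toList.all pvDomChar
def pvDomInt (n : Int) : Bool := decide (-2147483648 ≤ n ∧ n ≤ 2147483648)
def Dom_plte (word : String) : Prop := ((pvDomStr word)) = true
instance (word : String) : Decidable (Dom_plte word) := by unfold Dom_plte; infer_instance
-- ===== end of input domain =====

-- B strips the pig-latin suffix with find/rfind and slicing instead of A's char-by-char
-- accumulator loops over the (reversed) string: simpler, same values everywhere.

-- ===== PORT A =====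
-- the 'for i in word: if i != "w": fstring += i else: break' loop
def plteLoopA (acc : List Char) : List Char → List Char
  | [] => acc
  | c :: rest => if c ≠ 'w' then plteLoopA (acc ++ [c]) rest else acc

-- the three-state loop over the reversed word: (firstr, secondr, found)
def plteLoopB (f sc : List Char) (found : Bool) : List Char → List Char × List Char
  | [] => (f, sc)
  | c :: rest =>
      if c ≠ 'a' ∧ found = false then plteLoopB (f ++ [c]) sc found rest
      else if c = 'a' ∧ found = false then plteLoopB f sc true rest
      else plteLoopB f (sc ++ [c]) found rest

def plte (word : String) : String :=
  if PySem.Str.isIn "way" word then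
    String.ofList (plteLoopA [] word.toList)
  else
    let w1 := PySem.List.slice word.toList (some 0) (some (-2))          -- word[0:-2]
    let w2 := (PySem.List.slice? w1 none none (-1)).getD []              -- word[::-1]
    let p := plteLoopB [] [] false w2
    String.ofList (((PySem.List.slice? p.1 none none (-1)).getD []) ++
                   ((PySem.List.slice? p.2 none none (-1)).getD []))     -- firstr[::-1] + secondr[::-1]

-- ===== PORT B =====
def plte_alt (word : String) : String :=
  if PySem.Str.isIn "way" word then
    String.ofList (PySem.List.slice word.toList none (some (PySem.Str.find word "w")))   -- word[:word.find("w")]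
  else
    let s := PySem.List.slice word.toList none (some (-2))               -- word[:-2]
    let i := PySem.Chars.rfind s ['a']                                   -- s.rfind("a")
    if i < 0 then String.ofList s
    else String.ofList (PySem.List.slice s (some (i + 1)) none ++
                        PySem.List.slice s none (some i))                -- s[i+1:] + s[:i]

-- ===== PRECONDITION & SPEC =====
def Spec_plte (word : String) (out : String) : Prop := out = plte_alt word
instance (word : String) (out : String) : Decidable (Spec_plte word out) := by unfold Spec_plte; infer_instance

-- ===== CLAIM (what is proved, stated in full; the proofs are below) =====
def Claim_equal_plte : Prop := ∀ (word : String), Dom_plte word → Spec_plte word (plte word)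

-- ===== LEMMAS AND PROOFS =====

theorem plteLoopA_eq (l : List Char) : ∀ acc, plteLoopA acc l = acc ++ l.takeWhile (· ≠ 'w') := by
  induction l with
  | nil => intro acc; simp [plteLoopA]
  | cons c rest ih =>
      intro acc
      by_cases h : c = 'w'
      · simp [plteLoopA, h, List.takeWhile]
      · simp [plteLoopA, h, List.takeWhile, ih]

theorem plteLoopB_found (l : List Char) : ∀ f sc, plteLoopB f sc true l = (f, sc ++ l) := by
  induction l with
  | nil => intro f sc; simp [plteLoopB]
  | cons c rest ih => intro f sc; simp [plteLoopB, ih]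

theorem plteLoopB_eq (l : List Char) : ∀ f sc,
    plteLoopB f sc false l
      = (f ++ l.takeWhile (· ≠ 'a'), sc ++ (l.dropWhile (· ≠ 'a')).tail) := by
  induction l with
  | nil => intro f sc; simp [plteLoopB]
  | cons c rest ih =>
      intro f sc
      by_cases h : c = 'a'
      · simp [plteLoopB, h, List.takeWhile, List.dropWhile, plteLoopB_found]
      · simp [plteLoopB, h, List.takeWhile, List.dropWhile, ih]

-- first/last occurrence decompositions
theorem exists_first_split (c : Char) (l : List Char) (h : c ∈ l) :
    ∃ u v, l = u ++ c :: v ∧ c ∉ u := by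
  induction l with
  | nil => cases h
  | cons x rest ih =>
      by_cases hx : x = c
      · exact ⟨[], rest, by simp [hx], by simp⟩
      · have hc : c ∈ rest := by
          cases h with
          | head => exact absurd rfl hx
          | tail _ h => exact h
        obtain ⟨u, v, hl, hu⟩ := ih hc
        exact ⟨x :: u, v, by simp [hl], by simp [hu]; exact fun h => hx h.symm⟩

theorem exists_last_split (c : Char) (l : List Char) (h : c ∈ l) :
    ∃ u v, l = u ++ c :: v ∧ c ∉ v := by
  induction l with
  | nil => cases h
  | cons x rest ih =>
      by_cases hc : c ∈ rest
      · obtain ⟨u, v, hl, hv⟩ := ih hc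
        exact ⟨x :: u, v, by simp [hl], hv⟩
      · have hx : x = c := by
          cases h with
          | head => rfl
          | tail _ h => exact absurd h hc
        exact ⟨[], rest, by simp [hx], hc⟩

theorem takeWhile_all_append (p : Char → Bool) (u : List Char) (c : Char) (v : List Char)
    (hu : ∀ x ∈ u, p x) (hc : ¬ p c) :
    (u ++ c :: v).takeWhile p = u ∧ (u ++ c :: v).dropWhile p = c :: v := by
  induction u with
  | nil => simp [hc]
  | cons x rest ih =>
      have hx : p x := hu x (by simp)
      have := ih (fun y hy => hu y (by simp [hy]))
      simp [hx, this.1, this.2]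

theorem singleton_isPrefixOf (c : Char) (l : List Char) :
    [c].isPrefixOf l = true ↔ ∃ t, l = c :: t := by
  cases l with
  | nil => simp
  | cons x t =>
      simp only [List.isPrefixOf, Bool.and_eq_true, beq_iff_eq, List.cons.injEq]
      constructor
      · rintro ⟨h1, _⟩; exact ⟨t, h1.symm, rfl⟩
      · rintro ⟨t', h1, h2⟩; subst h2; exact ⟨h1.symm, by simp⟩

theorem rfind_go_eq_of (s sub : List Char) (m : ℕ)
    (hm : sub.isPrefixOf (s.drop m) = true) :
    ∀ j, m ≤ j → (∀ i, m < i → i ≤ j → ¬ sub.isPrefixOf (s.drop i) = true) →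
      PySem.Chars.rfind.go s sub j = (m : ℤ) := by
  intro j
  induction j with
  | zero =>
      intro hj _
      have : m = 0 := Nat.le_zero.mp hj
      subst this
      rw [PySem.Chars.rfind.go.eq_def]
      rw [List.drop_zero] at hm
      simp [hm]
  | succ j ih =>
      intro hj hup
      rw [PySem.Chars.rfind.go.eq_def]
      by_cases he : m = j + 1
      · subst he; simp [hm]
      · have hmj : m ≤ j := by omega
        have hfail : ¬ sub.isPrefixOf (s.drop (j + 1)) = true :=
          hup (j + 1) (by omega) (by omega)
        simp only [hfail, if_false, Bool.false_eq_true]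
        exact ih hmj (fun i h1 h2 => hup i h1 (by omega))

theorem rfind_go_neg (s sub : List Char) :
    ∀ j, (∀ i, i ≤ j → ¬ sub.isPrefixOf (s.drop i) = true) →
      PySem.Chars.rfind.go s sub j = -1 := by
  intro j
  induction j with
  | zero =>
      intro h
      rw [PySem.Chars.rfind.go.eq_def]
      have := h 0 (le_refl 0)
      simp at this
      simp [this]
  | succ j ih =>
      intro h
      rw [PySem.Chars.rfind.go.eq_def]
      have hfail := h (j + 1) (le_refl _)
      simp only [hfail, if_false, Bool.false_eq_true]
      exact ih (fun i hi => h i (by omega))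

theorem rfind_not_mem (s : List Char) (c : Char) (h : c ∉ s) :
    PySem.Chars.rfind s [c] = -1 := by
  unfold PySem.Chars.rfind
  apply rfind_go_neg
  intro i _ hpre
  obtain ⟨t, ht⟩ := (singleton_isPrefixOf c _).mp hpre
  exact h (List.mem_of_mem_drop (ht ▸ List.mem_cons_self))

theorem rfind_last_split (u v : List Char) (c : Char) (hv : c ∉ v) :
    PySem.Chars.rfind (u ++ c :: v) [c] = (u.length : ℤ) := by
  unfold PySem.Chars.rfind
  apply rfind_go_eq_of
  · simp [List.drop_left']
  · simp
  · intro i h1 _ hpre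
    obtain ⟨t, ht⟩ := (singleton_isPrefixOf c _).mp hpre
    have hdrop : (u ++ c :: v).drop i = v.drop (i - (u.length + 1)) := by
      have hv1 : (u ++ c :: v).drop (u.length + 1) = v := by
        rw [show u ++ c :: v = (u ++ [c]) ++ v by simp,
            show u.length + 1 = (u ++ [c]).length by simp, List.drop_left]
      calc (u ++ c :: v).drop i
            = ((u ++ c :: v).drop (u.length + 1)).drop (i - (u.length + 1)) := by
              rw [List.drop_drop]; congr 1; omega
        _ = v.drop (i - (u.length + 1)) := by rw [hv1]
    rw [hdrop] at ht
    exact hv (List.mem_of_mem_drop (ht ▸ List.mem_cons_self))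

theorem find_first_split (u v : List Char) (c : Char) (hu : c ∉ u) :
    PySem.Chars.find (u ++ c :: v) [c] = (u.length : ℤ) := by
  have hmem : [c] <:+: (u ++ c :: v) := ⟨u, v, by simp⟩
  have hnn : 0 ≤ PySem.Chars.find (u ++ c :: v) [c] :=
    (PySem.Chars.find_nonneg_iff _ _).mpr hmem
  obtain ⟨hpre, hmin⟩ := PySem.Chars.find_spec hnn
  set m := (PySem.Chars.find (u ++ c :: v) [c]).toNat with hm
  have hle : m ≤ u.length := by
    by_contra hlt
    have hdl : List.drop u.length (u ++ c :: v) = c :: v := List.drop_left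
    have hp : [c] <+: List.drop u.length (u ++ c :: v) := by rw [hdl]; exact ⟨v, rfl⟩
    exact hmin u.length (by omega) hp
  have : m = u.length := by
    rcases Nat.lt_or_ge m u.length with hlt | hge
    · exfalso
      obtain ⟨t, ht⟩ := hpre
      have hget : (u ++ c :: v)[m]? = some c := by
        have h0 : ((u ++ c :: v).drop m)[0]? = some c := by rw [← ht]; rfl
        rw [List.getElem?_drop] at h0
        simpa using h0
      rw [List.getElem?_append_left hlt] at hget
      exact hu (List.mem_of_getElem? hget)
    · omega
  omega

theorem branch1_eq (l : List Char) (h : 'w' ∈ l) :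
    plteLoopA [] l = PySem.List.slice l none (some (PySem.Chars.find l ['w'])) := by
  obtain ⟨u, v, hl, hu⟩ := exists_first_split 'w' l h
  subst hl
  rw [find_first_split u v 'w' hu, plteLoopA_eq]
  rw [PySem.List.slice_to_natCast]
  rw [(takeWhile_all_append (fun c => decide (c ≠ 'w')) u 'w' v
      (fun x hx => by simp; exact fun he => hu (he ▸ hx)) (by simp)).1]
  simp only [List.nil_append, List.take_left]

theorem branch2_eq (s : List Char) :
    (((PySem.List.slice? (plteLoopB [] [] false ((PySem.List.slice? s none none (-1)).getD [])).1 none none (-1)).getD []) ++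
     ((PySem.List.slice? (plteLoopB [] [] false ((PySem.List.slice? s none none (-1)).getD [])).2 none none (-1)).getD []))
    = (if PySem.Chars.rfind s ['a'] < 0 then s
       else PySem.List.slice s (some (PySem.Chars.rfind s ['a'] + 1)) none ++
            PySem.List.slice s none (some (PySem.Chars.rfind s ['a']))) := by
  simp only [PySem.List.slice?_none_none_neg_one, Option.getD_some]
  by_cases h : 'a' ∈ s
  · obtain ⟨u, v, hl, hv⟩ := exists_last_split 'a' s h
    subst hl
    have hrf := rfind_last_split u v 'a' hv
    rw [hrf]
    have hneg : ¬ ((u.length : ℤ) < 0) := by omega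
    rw [if_neg hneg]
    have hrev : (u ++ 'a' :: v).reverse = v.reverse ++ 'a' :: u.reverse := by simp
    rw [hrev, plteLoopB_eq]
    have hsplit := takeWhile_all_append (fun x => decide (x ≠ 'a')) v.reverse 'a' u.reverse
      (fun x hx => by simp; exact fun he => hv (he ▸ (List.mem_reverse.mp hx))) (by simp)
    rw [hsplit.1, hsplit.2]
    have h1 : ((u.length : ℤ) + 1) = (((u.length + 1 : ℕ)) : ℤ) := by push_cast; ring
    rw [h1, PySem.List.slice_from_natCast, PySem.List.slice_to_natCast]
    have hdrop : (u ++ 'a' :: v).drop (u.length + 1) = v := by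
      have : u ++ 'a' :: v = (u ++ ['a']) ++ v := by simp
      rw [this]
      have hlen : u.length + 1 = (u ++ ['a']).length := by simp
      rw [hlen, List.drop_left]
    rw [hdrop, List.take_left]
    simp
  · have hrf := rfind_not_mem s 'a' h
    rw [hrf]
    rw [if_pos (by norm_num : (-1 : ℤ) < 0)]
    have htw : s.reverse.takeWhile (· ≠ 'a') = s.reverse := by
      rw [List.takeWhile_eq_self_iff]
      intro x hx
      simp
      exact fun he => h (he ▸ List.mem_reverse.mp hx)
    have hdw : s.reverse.dropWhile (· ≠ 'a') = [] := by
      rw [List.dropWhile_eq_nil_iff]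
      intro x hx
      simp
      exact fun he => h (he ▸ List.mem_reverse.mp hx)
    rw [plteLoopB_eq, htw, hdw]
    simp

-- ===== VERDICT (by name: the statement is the Claim_ definition above) =====
theorem plte_spec : Claim_equal_plte := by
  intro word _
  unfold Spec_plte plte plte_alt
  by_cases hin : PySem.Str.isIn "way" word = true
  · simp only [hin, if_true]
    have hin' : PySem.Chars.isIn "way".toList word.toList = true := by
      rw [← PySem.Str.isIn_eq]; exact hin
    have hinf : ("way".toList) <:+: word.toList := (PySem.Chars.isIn_iff_infix _ _).mp hin'
    have hw : 'w' ∈ word.toList := by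
      obtain ⟨p, q, hpq⟩ := hinf
      rw [← hpq]
      simp
    rw [branch1_eq word.toList hw]
    rw [PySem.Str.find_eq]
    rfl
  · simp only [hin, if_false, Bool.false_eq_true]
    rw [show PySem.List.slice word.toList (some 0) (some (-2))
          = PySem.List.slice word.toList none (some (-2)) by simp]
    have := branch2_eq (PySem.List.slice word.toList none (some (-2)))
    split_ifs at this ⊢ with hlt
    · exact congrArg String.ofList (by rw [this])
    · exact congrArg String.ofList (by rw [this])
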